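-- pv_equiv track=rewrite | github.com/compolis/GABM | scripts/update_docs_assets.py | clean_code_blocks
-- ===== SOURCE A (Python) =====
-- def clean_code_blocks(md):
--     """
--     Normalize code blocks to use triple backticks and remove extra blank lines inside code blocks.
--     Args:
--         md (str): Markdown content.
--     Returns:
--         str: Cleaned Markdown content.
--     """
--     lines = md.splitlines()
--     in_code = False
--     cleaned = []
--     for line in lines:
--         if line.strip().startswith('```') or line.strip().startswith('~~~~'):
--             in_code = not in_code
--             cleaned.append('```')
--             continue
--         if in_code and line.strip() == '':
--             continue
--         cleaned.append(line)
--     return '\n'.join(cleaned)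
-- ===== SOURCE B (Python) =====
-- def _split_on_fences(lines):
--     """Split lines into chunks delimited by fence lines; chunk 0 is before the
--     first fence, and code/text status alternates chunk by chunk."""
--     chunks = [[]]
--     for line in lines:
--         s = line.strip()
--         if s.startswith('```') or s.startswith('~~~~'):
--             chunks.append([])
--         else:
--             chunks[-1].append(line)
--     return chunks
--
--
-- def clean_code_blocks(md):
--     pieces = []
--     for i, chunk in enumerate(_split_on_fences(md.splitlines())):
--         if i:
--             pieces.append('```')
--         if i % 2 == 0:
--             pieces.extend(chunk)
--         else:
--             pieces.extend(l for l in chunk if l.strip())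
--     return '\n'.join(pieces)
-- ===== Notes on version B (the rewrite author's own statement) =====
-- stated objective: alternative
-- what changed: B splits the lines once into fence-delimited chunks and then renders them by alternating chunk roles (outside/inside code), replacing A's per-line in_code boolean toggle loop.
import Mathlib
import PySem

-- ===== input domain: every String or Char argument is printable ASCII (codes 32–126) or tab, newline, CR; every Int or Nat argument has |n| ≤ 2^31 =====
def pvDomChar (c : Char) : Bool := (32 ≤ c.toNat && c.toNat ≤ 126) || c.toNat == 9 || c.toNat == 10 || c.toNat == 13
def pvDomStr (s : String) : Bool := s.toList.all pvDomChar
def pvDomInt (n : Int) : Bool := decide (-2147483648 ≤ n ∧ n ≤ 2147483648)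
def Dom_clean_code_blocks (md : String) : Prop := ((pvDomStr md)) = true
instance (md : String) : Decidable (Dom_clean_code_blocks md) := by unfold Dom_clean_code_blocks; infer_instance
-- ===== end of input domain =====

-- B rebuilds the output from fence-delimited segments (split once, then render by
-- alternating segment roles) instead of A's per-line in_code toggle; objective: alternative decomposition.

-- ===== PORT A =====
def pvFenceA (line : String) : Bool :=
  PySem.Str.startswith (PySem.Str.strip line) "```" ||
  PySem.Str.startswith (PySem.Str.strip line) "~~~~"

def pvStepA (st : Bool × List String) (line : String) : Bool × List String :=
  if pvFenceA line then (!st.1, st.2 ++ ["```"])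
  else if st.1 && (PySem.Str.strip line == "") then st
  else (st.1, st.2 ++ [line])

def clean_code_blocks (md : String) : String :=
  PySem.Str.join "\n" ((PySem.Str.splitlines md).foldl pvStepA (false, [])).2

-- ===== PORT B =====
def pvFenceB (line : String) : Bool :=
  let s := PySem.Str.strip line
  PySem.Str.startswith s "```" || PySem.Str.startswith s "~~~~"

-- chunks[-1].append(line) / chunks.append([]) of Source B's _split_on_fences
def pvStepB (chunks : List (List String)) (line : String) : List (List String) :=
  if pvFenceB line then chunks ++ [[]]
  else chunks.dropLast ++ [chunks.getLastD [] ++ [line]]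

def pvSplitOnFences (lines : List String) : List (List String) :=
  lines.foldl pvStepB [[]]

def pvStepRender (acc : List String) (p : Int × List String) : List String :=
  (if p.1 == 0 then acc else acc ++ ["```"]) ++
  (if PySem.Int.mod p.1 2 == 0 then p.2
   else p.2.filter (fun l => !(PySem.Str.strip l == "")))

def clean_code_blocks_alt (md : String) : String :=
  PySem.Str.join "\n"
    ((PySem.List.enumerate (pvSplitOnFences (PySem.Str.splitlines md))).foldl pvStepRender [])

-- ===== PRECONDITION & SPEC =====
def Spec_clean_code_blocks (md : String) (out : String) : Prop := out = clean_code_blocks_alt md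
instance (md : String) (out : String) : Decidable (Spec_clean_code_blocks md out) := by unfold Spec_clean_code_blocks; infer_instance

-- ===== CLAIM (what is proved, stated in full; the proofs are below) =====
def Claim_equal_clean_code_blocks : Prop := ∀ (md : String), Dom_clean_code_blocks md → Spec_clean_code_blocks md (clean_code_blocks md)

-- ===== LEMMAS AND PROOFS =====

theorem pvFenceB_eq (l : String) : pvFenceB l = pvFenceA l := rfl

-- recursive characterisation of A's loop body
def pvCleanRec : Bool → List String → List String
  | _, [] => []
  | ic, l :: rest =>
    if pvFenceA l then "```" :: pvCleanRec (!ic) rest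
    else if ic && (PySem.Str.strip l == "") then pvCleanRec ic rest
    else l :: pvCleanRec ic rest

theorem pvCleanRec_cons (ic : Bool) (l : String) (rest : List String) :
    pvCleanRec ic (l :: rest) =
      if pvFenceA l then "```" :: pvCleanRec (!ic) rest
      else if ic && (PySem.Str.strip l == "") then pvCleanRec ic rest
      else l :: pvCleanRec ic rest := rfl

theorem pvFoldA (lines : List String) : ∀ (ic : Bool) (acc : List String),
    (lines.foldl pvStepA (ic, acc)).2 = acc ++ pvCleanRec ic lines := by
  induction lines with
  | nil => intro ic acc; simp [pvCleanRec]
  | cons l rest ih =>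
    intro ic acc
    rw [List.foldl_cons, pvCleanRec_cons]
    by_cases hf : pvFenceA l = true
    · rw [show pvStepA (ic, acc) l = (!ic, acc ++ ["```"]) from by
        unfold pvStepA; rw [if_pos hf]]
      rw [ih, if_pos hf]; simp
    · rw [if_neg hf]
      by_cases hs : (ic && (PySem.Str.strip l == "")) = true
      · rw [show pvStepA (ic, acc) l = (ic, acc) from by
          unfold pvStepA; rw [if_neg hf, if_pos hs]]
        rw [ih, if_pos hs]
      · rw [show pvStepA (ic, acc) l = (ic, acc ++ [l]) from by
          unfold pvStepA; rw [if_neg hf, if_neg hs]]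
        rw [ih, if_neg hs]; simp

-- recursive characterisation of B's chunk splitting
def pvSegs : List String → List (List String)
  | [] => [[]]
  | l :: rest =>
    if pvFenceA l then [] :: pvSegs rest
    else match pvSegs rest with
      | s :: ss => (l :: s) :: ss
      | [] => [[l]]

theorem pvSegs_cons (l : String) (rest : List String) :
    pvSegs (l :: rest) =
      if pvFenceA l then [] :: pvSegs rest
      else match pvSegs rest with
        | s :: ss => (l :: s) :: ss
        | [] => [[l]] := rfl

theorem pvSegs_ne_nil (lines : List String) : pvSegs lines ≠ [] := by
  cases lines with
  | nil => simp [pvSegs]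
  | cons l rest =>
    rw [pvSegs_cons]
    split
    · simp
    · split <;> simp

def pvConsAll (cur : List String) : List (List String) → List (List String)
  | s :: ss => (cur ++ s) :: ss
  | [] => [cur]

theorem pvFoldB (lines : List String) : ∀ (pre : List (List String)) (cur : List String),
    lines.foldl pvStepB (pre ++ [cur]) = pre ++ pvConsAll cur (pvSegs lines) := by
  induction lines with
  | nil => intro pre cur; simp [pvSegs, pvConsAll]
  | cons l rest ih =>
    intro pre cur
    rw [List.foldl_cons, pvSegs_cons]
    by_cases hf : pvFenceA l = true
    · rw [show pvStepB (pre ++ [cur]) l = (pre ++ [cur]) ++ [[]] from by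
        unfold pvStepB; rw [pvFenceB_eq, if_pos hf]]
      rw [ih, if_pos hf]
      cases hS : pvSegs rest with
      | nil => exact absurd hS (pvSegs_ne_nil rest)
      | cons s ss => simp [pvConsAll]
    · rw [show pvStepB (pre ++ [cur]) l = pre ++ [cur ++ [l]] from by
        unfold pvStepB
        rw [pvFenceB_eq, if_neg hf, List.dropLast_concat, List.getLastD_concat]]
      rw [ih, if_neg hf]
      cases hS : pvSegs rest with
      | nil => exact absurd hS (pvSegs_ne_nil rest)
      | cons s ss =>
        have hred : (match s :: ss with | s :: ss => (l :: s) :: ss | [] => [[l]]) = (l :: s) :: ss := rfl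
        rw [hred]; simp [pvConsAll]

theorem pvSplitOnFences_eq (lines : List String) : pvSplitOnFences lines = pvSegs lines := by
  have h := pvFoldB lines [] []
  simp only [List.nil_append] at h
  unfold pvSplitOnFences
  rw [h]
  cases hS : pvSegs lines with
  | nil => exact absurd hS (pvSegs_ne_nil lines)
  | cons s ss => simp [pvConsAll]

def pvBody (b : Bool) (c : List String) : List String :=
  if b then c.filter (fun l => !(PySem.Str.strip l == "")) else c

def pvJoinRest : Bool → List (List String) → List String
  | _, [] => []
  | b, c :: cs => "```" :: (pvBody b c ++ pvJoinRest (!b) cs)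

def pvRender : Bool → List (List String) → List String
  | _, [] => []
  | b, c :: cs => pvBody b c ++ pvJoinRest (!b) cs

theorem pvBody_cons (b : Bool) (l : String) (c : List String) :
    pvBody b (l :: c) = (if b && (PySem.Str.strip l == "") then [] else [l]) ++ pvBody b c := by
  cases b <;> by_cases hs : (PySem.Str.strip l == "") = true <;>
    simp [pvBody, hs, List.filter]

theorem pvCleanRec_eq_render (lines : List String) : ∀ (ic : Bool),
    pvCleanRec ic lines = pvRender ic (pvSegs lines) := by
  induction lines with
  | nil => intro ic; simp [pvCleanRec, pvSegs, pvRender, pvBody, pvJoinRest]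
  | cons l rest ih =>
    intro ic
    rw [pvCleanRec_cons, pvSegs_cons]
    by_cases hf : pvFenceA l = true
    · rw [if_pos hf, if_pos hf, ih]
      cases hS : pvSegs rest with
      | nil => exact absurd hS (pvSegs_ne_nil rest)
      | cons s ss => simp [pvRender, pvJoinRest, pvBody]
    · rw [if_neg hf, if_neg hf]
      cases hS : pvSegs rest with
      | nil => exact absurd hS (pvSegs_ne_nil rest)
      | cons s ss =>
        have ih' := ih ic
        rw [hS] at ih'
        simp only [pvRender] at ih'
        have hred : (match s :: ss with | s :: ss => (l :: s) :: ss | [] => [[l]]) = (l :: s) :: ss := rfl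
        rw [hred]
        simp only [pvRender]
        by_cases hs : (ic && (PySem.Str.strip l == "")) = true
        · rw [if_pos hs, ih', pvBody_cons, if_pos hs]
          simp
        · rw [if_neg hs, ih', pvBody_cons, if_neg hs]
          simp

theorem pvMod_succ (i : Int) :
    (PySem.Int.mod (i + 1) 2 == 0) = !(PySem.Int.mod i 2 == 0) := by
  rw [PySem.Int.mod_eq_emod_of_pos (by norm_num), PySem.Int.mod_eq_emod_of_pos (by norm_num)]
  by_cases h0 : i % 2 = 0
  · have h1 : (i + 1) % 2 = 1 := by omega
    simp [h0, h1]
  · have h1 : i % 2 = 1 := by omega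
    have h2 : (i + 1) % 2 = 0 := by omega
    simp [h1, h2]

theorem pvFoldRender (cs : List (List String)) : ∀ (i : Int) (acc : List String),
    1 ≤ i →
    (PySem.List.enumerate cs i).foldl pvStepRender acc =
      acc ++ pvJoinRest (!(PySem.Int.mod i 2 == 0)) cs := by
  induction cs with
  | nil => intro i acc _; simp [PySem.List.enumerate_nil, pvJoinRest]
  | cons c cs ih =>
    intro i acc hi
    rw [PySem.List.enumerate_cons, List.foldl_cons, ih (i + 1) _ (by omega)]
    have hne : (i == 0) = false := by simp; omega
    by_cases hm : (PySem.Int.mod i 2 == 0) = true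
    · simp only [pvStepRender, pvJoinRest, pvBody, pvMod_succ, hne, hm]
      simp
    · rw [Bool.not_eq_true] at hm
      simp only [pvStepRender, pvJoinRest, pvBody, pvMod_succ, hne, hm]
      simp

theorem pvRender_fold (chunks : List (List String)) :
    (PySem.List.enumerate chunks).foldl pvStepRender [] = pvRender false chunks := by
  cases chunks with
  | nil => simp [PySem.List.enumerate_nil, pvRender]
  | cons c cs =>
    rw [PySem.List.enumerate_cons, List.foldl_cons,
        pvFoldRender cs (0 + 1) _ (by omega)]
    have h1 : (PySem.Int.mod (0 + 1) 2 == 0) = false := by decide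
    have h0 : ((0 : Int) == 0) = true := by decide
    have h2 : (PySem.Int.mod (0 : Int) 2 == 0) = true := by decide
    simp only [pvStepRender, h0, h1, h2, pvRender, pvBody]
    simp

-- ===== VERDICT (by name: the statement is the Claim_ definition above) =====
theorem clean_code_blocks_spec : Claim_equal_clean_code_blocks := by
  intro md _
  show clean_code_blocks md = clean_code_blocks_alt md
  unfold clean_code_blocks clean_code_blocks_alt
  rw [pvSplitOnFences_eq, pvRender_fold, pvFoldA, pvCleanRec_eq_render]
  simp
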